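-- pv_equiv track=rewrite | github.com/marcochang1028/Curve-Type-Detection-by-CNN | Program/curve_net_gen_images.py | one_hot_string
-- ===== SOURCE A (Python) =====
-- def one_hot_string(max_num, curr_num):
--     one_hot_string = ''
--     for i in range(max_num):
--         if i == (curr_num):
--             one_hot_string += '1,'
--         else:
--             one_hot_string += '0,'
--     return one_hot_string[:len(one_hot_string)-1]
-- ===== SOURCE B (Python) =====
-- def one_hot_string(max_num, curr_num):
--     parts = ['0'] * max_num
--     if 0 <= curr_num < max_num:
--         parts[curr_num] = '1'
--     return ','.join(parts)
-- ===== Notes on version B (the rewrite author's own statement) =====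
-- stated objective: simpler
-- what changed: B builds the one-hot row by direct placement (a list of '0' parts with one slot set to '1' when curr_num is in range) joined once with commas, instead of A's per-index equality test with running string concatenation and a trailing-comma slice.
import Mathlib
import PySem

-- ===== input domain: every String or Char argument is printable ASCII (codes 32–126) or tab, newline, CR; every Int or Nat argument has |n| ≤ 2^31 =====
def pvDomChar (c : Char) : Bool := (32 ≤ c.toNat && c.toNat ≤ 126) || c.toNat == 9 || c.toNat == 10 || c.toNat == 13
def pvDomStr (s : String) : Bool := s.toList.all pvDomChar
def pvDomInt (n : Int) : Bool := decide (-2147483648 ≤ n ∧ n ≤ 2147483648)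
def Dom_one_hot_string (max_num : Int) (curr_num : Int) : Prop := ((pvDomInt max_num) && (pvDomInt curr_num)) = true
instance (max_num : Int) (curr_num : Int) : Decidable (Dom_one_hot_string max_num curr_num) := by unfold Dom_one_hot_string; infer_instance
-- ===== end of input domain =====

-- B replaces A's per-index comparison loop (running concatenation + trailing-comma slice) by
-- direct placement into a replicated list and one comma-join; simpler decomposition, same values.

-- ===== PORT A =====
def one_hot_string (max_num : Int) (curr_num : Int) : String :=
  let s := (PySem.List.pyRange 0 max_num 1).foldl
    (fun acc i => if i == curr_num then acc ++ "1," else acc ++ "0,") ""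
  PySem.Str.slice s none (some (PySem.Str.len s - 1))

-- ===== PORT B =====
def one_hot_string_alt (max_num : Int) (curr_num : Int) : String :=
  let parts := List.replicate max_num.toNat "0"
  let parts := if 0 ≤ curr_num ∧ curr_num < max_num then parts.set curr_num.toNat "1" else parts
  PySem.Str.join "," parts

-- ===== PRECONDITION & SPEC =====
def Spec_one_hot_string (max_num : Int) (curr_num : Int) (out : String) : Prop := out = one_hot_string_alt max_num curr_num
instance (max_num : Int) (curr_num : Int) (out : String) : Decidable (Spec_one_hot_string max_num curr_num out) := by unfold Spec_one_hot_string; infer_instance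

-- ===== CLAIM =====
def Claim_equal_one_hot_string : Prop := ∀ (max_num : Int) (curr_num : Int), Dom_one_hot_string max_num curr_num → Spec_one_hot_string max_num curr_num (one_hot_string max_num curr_num)

-- ===== LEMMAS AND PROOFS =====

-- A's loop, char-level: the fold appends the 2-char token of each i.
theorem foldA_toList (l : List Int) (c : Int) (init : String) :
    (l.foldl (fun acc i => if i == c then acc ++ "1," else acc ++ "0,") init).toList
      = init.toList ++ l.flatMap (fun i => if i = c then ['1', ','] else ['0', ',']) := by
  induction l generalizing init with
  | nil => simp
  | cons x xs ih =>
    rw [List.foldl_cons, List.flatMap_cons, ih]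
    by_cases h : x = c <;> simp [h]

theorem lenA (l : List Int) (c : Int) :
    (l.flatMap (fun i => if i = c then ['1', ','] else ['0', ','])).length = 2 * l.length := by
  induction l with
  | nil => simp
  | cons x xs ih =>
    rw [List.flatMap_cons]
    by_cases h : x = c <;> simp [h, ih] <;> omega

theorem dropLast_append_ne {a b : List Char} (hb : b ≠ []) :
    (a ++ b).dropLast = a ++ b.dropLast := by
  rw [List.dropLast_append]
  simp [List.isEmpty_iff, hb]

-- joining with "," equals flatten-with-trailing-comma minus the last comma.
theorem join_comma_eq_dropLast (l : List (List Char)) :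
    PySem.Chars.join [','] l = (l.flatMap (fun p => p ++ [','])).dropLast := by
  induction l with
  | nil => simp [PySem.Chars.join_nil]
  | cons p rest ih =>
    cases rest with
    | nil => simp [PySem.Chars.join_singleton]
    | cons q rest' =>
      have hne : (List.flatMap (fun p => p ++ [',']) (q :: rest')) ≠ [] := by
        simp [List.flatMap_cons]
      conv_rhs => rw [List.flatMap_cons]
      rw [dropLast_append_ne hne, PySem.Chars.join_cons_cons, ih, List.append_assoc]

-- B's parts list, char-level: it is the per-index one-hot token list.
theorem partsB_eq (m c : Int) :
    ((if 0 ≤ c ∧ c < m then (List.replicate m.toNat "0").set c.toNat "1"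
      else List.replicate m.toNat "0").map String.toList)
      = (List.range m.toNat).map (fun (k : Nat) => if (k : Int) = c then ['1'] else ['0']) := by
  by_cases h : 0 ≤ c ∧ c < m
  · rw [if_pos h]
    apply List.ext_getElem
    · simp
    · intro k h1 h2
      have hk : k < m.toNat := by simpa using h1
      simp only [List.getElem_map, List.getElem_range, List.getElem_set]
      by_cases hkc : c.toNat = k
      · rw [if_pos hkc, if_pos (show ((k : Int) = c) by omega)]
        decide
      · rw [if_neg hkc, List.getElem_replicate, if_neg (show ¬((k : Int) = c) by omega)]
        decide
  · rw [if_neg h]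
    apply List.ext_getElem
    · simp
    · intro k h1 h2
      have hk : k < m.toNat := by simpa using h1
      have hne : ¬((k : Int) = c) := fun he => h ⟨by omega, by omega⟩
      simp only [List.getElem_map, List.getElem_range, List.getElem_replicate]
      rw [if_neg hne]
      decide

theorem tok_split (c : Int) (k : Nat) :
    (if (0 + (k : Int)) = c then ['1', ','] else ['0', ','])
      = (if (k : Int) = c then ['1'] else ['0']) ++ [','] := by
  rw [zero_add]; by_cases h : (k : Int) = c <;> simp [h]

-- ===== VERDICT =====
theorem one_hot_string_spec : Claim_equal_one_hot_string := by
  intro m c _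
  unfold Spec_one_hot_string one_hot_string one_hot_string_alt
  by_cases hm : 0 < m
  · rw [← String.toList_inj]
    rw [PySem.Str.toList_slice, PySem.Chars.slice_eq_listSlice, PySem.Str.len_eq,
        PySem.Str.toList_join, show (",".toList) = [','] from rfl,
        partsB_eq m c, join_comma_eq_dropLast, List.flatMap_map, foldA_toList,
        show ("".toList) = ([] : List Char) from rfl, List.nil_append]
    have hrange : PySem.List.pyRange 0 m 1
        = (List.range m.toNat).map (fun (k : Nat) => 0 + (k : Int)) := by
      rw [PySem.List.pyRange_one]
      norm_num
    rw [hrange, List.flatMap_map]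
    have htok : (List.range m.toNat).flatMap
          (fun (k : Nat) => if (0 + (k : Int)) = c then ['1', ','] else ['0', ','])
        = (List.range m.toNat).flatMap
          (fun (k : Nat) => (if (k : Int) = c then ['1'] else ['0']) ++ [',']) := by
      apply List.flatMap_congr; intro k _; exact tok_split c k
    rw [htok]
    have hlen : ((List.range m.toNat).flatMap
          (fun (k : Nat) => (if (k : Int) = c then ['1'] else ['0']) ++ [','])).length
        = 2 * m.toNat := by
      rw [← htok, ← List.flatMap_map (fun (k : Nat) => 0 + (k : Int))
          (fun i => if i = c then ['1', ','] else ['0', ',']), lenA]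
      simp
    have hb : (0 : Int) ≤ (((List.range m.toNat).flatMap
          (fun (k : Nat) => (if (k : Int) = c then ['1'] else ['0']) ++ [','])).length : Int) - 1 := by
      rw [hlen]; push_cast; omega
    rw [PySem.List.slice_to _ hb, List.dropLast_eq_take, hlen]
    congr 1
    omega
  · -- max_num ≤ 0: both sides are the empty string
    have hr : PySem.List.pyRange 0 m 1 = [] := PySem.List.pyRange_one_eq_nil (by omega)
    have h0 : m.toNat = 0 := by omega
    have hc : ¬(0 ≤ c ∧ c < m) := by omega
    rw [hr, h0]
    simp only [List.foldl_nil, List.replicate_zero, hc, if_false]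
    decide
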